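-- pv_equiv track=rewrite | github.com/feralieva/HackBulgaria-Week0 | is_word/solution.py | is_an_bn
-- ===== SOURCE A (Python) =====
-- def is_an_bn(word):
-- 	iter = 0
-- 	if len(word)%2 != 0:
-- 		return False
-- 	else:
-- 		while iter <= len(word)/2 - 1:
-- 			if word[iter] != "a":
-- 				return False
-- 			else:
-- 				iter = iter + 1
-- 		while iter <=len(word) - 1:
-- 			if word[iter] != "b":
-- 				return False
-- 			else:
-- 				iter = iter + 1
-- 		return True
-- ===== SOURCE B (Python) =====
-- def is_an_bn(word):
--     n = len(word) // 2
--     return word == "a" * n + "b" * n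
-- ===== Notes on version B (the rewrite author's own statement) =====
-- stated objective: simpler
-- what changed: Replaces the parity guard plus two index-driven while-loops with one construction of the canonical string 'a'*n+'b'*n (n = len//2) and a single equality comparison; odd lengths fail the comparison automatically.
import Mathlib
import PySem

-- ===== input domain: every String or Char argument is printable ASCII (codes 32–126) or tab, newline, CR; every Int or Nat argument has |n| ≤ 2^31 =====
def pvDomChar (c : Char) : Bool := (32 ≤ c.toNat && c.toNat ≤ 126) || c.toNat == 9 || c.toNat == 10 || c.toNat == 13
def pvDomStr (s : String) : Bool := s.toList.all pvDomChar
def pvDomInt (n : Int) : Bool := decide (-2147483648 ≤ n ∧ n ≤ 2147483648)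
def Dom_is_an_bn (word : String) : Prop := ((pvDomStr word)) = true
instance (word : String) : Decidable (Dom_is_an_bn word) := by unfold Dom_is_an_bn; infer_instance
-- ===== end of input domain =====

-- B replaces A's parity guard + two while-loops with one equality test against the
-- canonical string "a"*n + "b"*n (objective: simpler).

-- ===== PORT A =====
-- One of A's while-loops: scan indices iter..stop checking cs[i] = c; returns none if a
-- mismatch returns False, some of the final iter value when the loop exits normally.
-- (Both call sites have stop ≤ len-1, so the index access is always in range and the
-- `none` arm for an out-of-range index is unreachable.)
def pvWhileA (cs : List Char) (c : Char) (stop : Int) (iter : Nat) : Option Nat :=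
  if (iter : Int) ≤ stop then
    match cs[iter]? with
    | none => none
    | some ch => if ch ≠ c then none else pvWhileA cs c stop (iter + 1)
  else some iter
termination_by (stop + 1 - iter).toNat
decreasing_by omega

def is_an_bn (word : String) : Bool :=
  let cs := word.toList
  if cs.length % 2 ≠ 0 then false
  else
    -- len(word)/2 is float in Python but integral here since the length is even
    match pvWhileA cs 'a' ((cs.length : Int) / 2 - 1) 0 with
    | none => false
    | some iter =>
      match pvWhileA cs 'b' ((cs.length : Int) - 1) iter with
      | none => false
      | some _ => true

-- ===== PORT B =====
def is_an_bn_alt (word : String) : Bool :=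
  let n := word.toList.length / 2
  word.toList == List.replicate n 'a' ++ List.replicate n 'b'

-- ===== PRECONDITION & SPEC =====
def Spec_is_an_bn (word : String) (out : Bool) : Prop := out = is_an_bn_alt word
instance (word : String) (out : Bool) : Decidable (Spec_is_an_bn word out) := by unfold Spec_is_an_bn; infer_instance

-- ===== CLAIM (what is proved, stated in full; the proofs are below) =====
def Claim_equal_is_an_bn : Prop := ∀ (word : String), Dom_is_an_bn word → Spec_is_an_bn word (is_an_bn word)

-- ===== LEMMAS AND PROOFS =====

-- The loop returns none exactly when some in-range index carries the wrong character.
theorem pvWhileA_eq_none (cs : List Char) (c : Char) (stop : Int) (iter : Nat) :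
    pvWhileA cs c stop iter = none ↔
      ∃ i : Nat, iter ≤ i ∧ (i : Int) ≤ stop ∧ cs[i]? ≠ some c := by
  refine pvWhileA.induct cs c stop
    (motive := fun it => (pvWhileA cs c stop it = none ↔
      ∃ i : Nat, it ≤ i ∧ (i : Int) ≤ stop ∧ cs[i]? ≠ some c)) ?_ ?_ ?_ ?_ iter
  · intro x hle hnone
    rw [pvWhileA]
    simp only [if_pos hle, hnone]
    exact iff_of_true (by trivial) ⟨x, le_refl _, hle, by simp [hnone]⟩
  · intro x hle ch hget hne
    rw [pvWhileA]
    simp only [if_pos hle, hget, if_pos hne]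
    exact iff_of_true (by trivial) ⟨x, le_refl _, hle, by simp [hget, hne]⟩
  · intro x hle ch hget hnene ih
    have hch : ch = c := not_ne_iff.mp hnene
    subst hch
    rw [pvWhileA]
    simp only [if_pos hle, hget, if_neg hnene]
    rw [ih]
    constructor
    · rintro ⟨i, h1, h2, h3⟩; exact ⟨i, by omega, h2, h3⟩
    · rintro ⟨i, h1, h2, h3⟩
      refine ⟨i, ?_, h2, h3⟩
      rcases Nat.eq_or_lt_of_le h1 with h | h
      · exfalso; subst h; exact h3 hget
      · omega
  · intro x hle
    rw [pvWhileA]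
    simp only [if_neg hle]
    refine iff_of_false (by simp) ?_
    rintro ⟨i, h1, h2, _⟩
    apply hle
    have : (x : Int) ≤ i := by exact_mod_cast h1
    omega

-- When the loop exits normally, the final iter value is max iter (stop+1).toNat.
theorem pvWhileA_eq_some (cs : List Char) (c : Char) (stop : Int) (iter : Nat) (j : Nat)
    (h : pvWhileA cs c stop iter = some j) : j = max iter (stop + 1).toNat := by
  refine pvWhileA.induct cs c stop
    (motive := fun it => pvWhileA cs c stop it = some j → j = max it (stop + 1).toNat)
    ?_ ?_ ?_ ?_ iter h
  · intro x hle hnone hx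
    rw [pvWhileA] at hx
    simp [if_pos hle, hnone] at hx
  · intro x hle ch hget hne hx
    rw [pvWhileA] at hx
    simp only [if_pos hle, hget, if_pos hne] at hx
    exact absurd hx (by simp)
  · intro x hle ch hget hnene ih hx
    rw [pvWhileA] at hx
    simp only [if_pos hle, hget, if_neg hnene] at hx
    have := ih hx
    omega
  · intro x hle hx
    rw [pvWhileA] at hx
    simp only [if_neg hle, Option.some.injEq] at hx
    omega

theorem main_lemma (word : String) : is_an_bn word = is_an_bn_alt word := by
  unfold is_an_bn is_an_bn_alt
  set cs := word.toList with hcs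
  by_cases hpar : cs.length % 2 ≠ 0
  · -- odd length: A returns false; B compares against a string of different length
    simp only [if_pos hpar]
    have hlen : cs.length ≠ cs.length / 2 + cs.length / 2 := by omega
    symm
    rw [beq_eq_false_iff_ne]
    intro h
    apply hlen
    have := congrArg List.length h
    simpa [List.length_append, List.length_replicate] using this
  · simp only [if_neg hpar]
    push Not at hpar
    set n := cs.length / 2 with hn
    have h2n : cs.length = 2 * n := by omega
    have hdiv : ((cs.length : Int) / 2 - 1) = (n : Int) - 1 := by
      rw [h2n]; push_cast; omega
    rw [hdiv]
    -- characterize the two loops and the list equality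
    by_cases hA : ∀ i : Nat, i < n → cs[i]? = some 'a'
    · -- first loop exits; it returns some n (or some 0 when n = 0)
      have hnotnone : pvWhileA cs 'a' ((n : Int) - 1) 0 ≠ none := by
        intro hcon
        rw [pvWhileA_eq_none] at hcon
        rcases hcon with ⟨i, _, h2, h3⟩
        exact h3 (hA i (by omega))
      rcases Option.ne_none_iff_exists'.mp hnotnone with ⟨j, hj⟩
      have hjval := pvWhileA_eq_some _ _ _ _ _ hj
      have hjn : j = n := by omega
      subst hjn
      simp only [hj]
      by_cases hB : ∀ i : Nat, n ≤ i → i < 2 * n → cs[i]? = some 'b'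
      · have hnotnone2 : pvWhileA cs 'b' ((cs.length : Int) - 1) n ≠ none := by
          intro hcon
          rw [pvWhileA_eq_none] at hcon
          rcases hcon with ⟨i, h1, h2, h3⟩
          exact h3 (hB i h1 (by omega))
        rcases Option.ne_none_iff_exists'.mp hnotnone2 with ⟨k, hk⟩
        simp only [hk]
        -- B side: the lists are equal
        symm
        rw [beq_iff_eq]
        apply List.ext_getElem?
        intro i
        by_cases h1 : i < n
        · rw [hA i h1]
          rw [List.getElem?_append_left (by simp; omega)]
          simp [h1]
        · by_cases h2 : i < 2 * n
          · rw [hB i (by omega) h2]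
            rw [List.getElem?_append_right (by simp; omega)]
            simp only [List.length_replicate, List.getElem?_replicate]
            rw [if_pos (by omega)]
          · rw [List.getElem?_eq_none (by omega)]
            rw [List.getElem?_eq_none (by simp; omega)]
      · -- a 'b'-position mismatch: second loop returns none, lists differ
        push Not at hB
        rcases hB with ⟨i, h1, h2, h3⟩
        have : pvWhileA cs 'b' ((cs.length : Int) - 1) n = none := by
          rw [pvWhileA_eq_none]
          exact ⟨i, h1, by omega, h3⟩
        simp only [this]
        symm
        rw [beq_eq_false_iff_ne]
        intro heq
        apply h3
        rw [heq]
        rw [List.getElem?_append_right (by simp; omega)]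
        simp only [List.length_replicate, List.getElem?_replicate]
        rw [if_pos (by omega)]
    · -- an 'a'-position mismatch: first loop returns none, lists differ
      push Not at hA
      rcases hA with ⟨i, h1, h3⟩
      have : pvWhileA cs 'a' ((n : Int) - 1) 0 = none := by
        rw [pvWhileA_eq_none]
        exact ⟨i, by omega, by omega, h3⟩
      simp only [this]
      symm
      rw [beq_eq_false_iff_ne]
      intro heq
      apply h3
      rw [heq]
      rw [List.getElem?_append_left (by simp; omega)]
      simp [h1]

-- ===== VERDICT (by name: the statement is the Claim_ definition above) =====
theorem is_an_bn_spec : Claim_equal_is_an_bn := by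
  intro word _
  unfold Spec_is_an_bn
  exact main_lemma word
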